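-- pv_equiv track=rewrite | github.com/StochasticCat/PokerAnalysis | extractingDataToCsvDisregardCashout.py | zaidejuVeiksmai
-- ===== SOURCE A (Python) =====
-- def zaidejuVeiksmai(x, maxSeat, usersList):
--     tmp = {}
--     cc = 1
--     rake = 0
--     #print (x)
--     for i in x:
--         if len(i) == 0:
--             break
--         '''if "| Rake " in i:  # we changed it from summary to get rake for every hand to check correctness
--             #rake = get_amount(i)
--             break'''
--         cc += 1
--     for j in usersList:  # TODO: need to make this street by street, mindind the FLOP,TURN,RIVER separators (4 streets)
--         tmp[j] = []
--         streetactions = []  # actions taken on a given street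
--         for i in x[:(cc - 1)]:
--             # print (i)
--             if ' said ' in i or ' said,' in i:  #### Disregard all the lines of people saying stuff #TODO consider that 'said' could be part of the name
--                 pass
--             else:
--                 if 'FLOP' in i or 'TURN' in i or 'RIVER' in i:
--                     tmp[j].append(streetactions)
--                     streetactions = []
--                 elif j in i:  #####look if a particular username is in line of iterable
--                     streetactions.append(i)
--         tmp[j].append(streetactions)
--
--     return tmp, rake
-- ===== SOURCE B (Python) =====
-- def zaidejuVeiksmai(x, maxSeat, usersList):
--     # Transposed single pass: instead of re-scanning the log once per user,
--     # walk the lines once, keeping per-user (finished streets, current street)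
--     # state and updating every user's state as each line arrives.
--     users = list(dict.fromkeys(usersList))
--     states = [[j, [], []] for j in users]
--     for line in x:
--         if len(line) == 0:
--             break
--         if ' said ' in line or ' said,' in line:
--             continue
--         if 'FLOP' in line or 'TURN' in line or 'RIVER' in line:
--             for st in states:
--                 st[1].append(st[2])
--                 st[2] = []
--         else:
--             for st in states:
--                 if st[0] in line:
--                     st[2].append(line)
--     return {st[0]: st[1] + [st[2]] for st in states}, 0
-- ===== Notes on version B (the rewrite author's own statement) =====
-- stated objective: faster
-- what changed: A re-scans the whole log once per user, redoing the empty-line cut, 'said'-filtering and street-splitting each time; B dedups the users once and makes a single transposed pass over the lines, updating every user's (finished streets, current street) state as each line arrives and assembling the dict at the end.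
import Mathlib
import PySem

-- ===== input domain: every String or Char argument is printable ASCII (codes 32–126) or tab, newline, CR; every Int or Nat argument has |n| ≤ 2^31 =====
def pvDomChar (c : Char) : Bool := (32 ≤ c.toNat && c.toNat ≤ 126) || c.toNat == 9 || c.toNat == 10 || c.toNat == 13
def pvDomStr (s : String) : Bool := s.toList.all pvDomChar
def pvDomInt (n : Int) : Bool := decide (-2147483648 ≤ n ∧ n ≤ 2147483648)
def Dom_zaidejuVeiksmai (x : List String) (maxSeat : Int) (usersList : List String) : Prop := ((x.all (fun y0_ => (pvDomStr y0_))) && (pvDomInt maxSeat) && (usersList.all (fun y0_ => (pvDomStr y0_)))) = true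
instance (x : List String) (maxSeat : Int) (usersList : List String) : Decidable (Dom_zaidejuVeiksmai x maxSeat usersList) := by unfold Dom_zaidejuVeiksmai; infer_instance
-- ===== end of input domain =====

-- B replaces A's per-user rescan of the whole log by ONE transposed pass over the lines
-- that advances every user's (finished streets, current street) state as each line arrives
-- (objective: faster — the line filtering/splitting work is done once instead of once per user).

-- ===== PORT A =====
-- first loop of A: cc starts at 1, +1 per line until the first empty line (break)
def pvCcLoop : List String → Int → Int
  | [], c => c
  | i :: rest, c => if PySem.Str.len i = 0 then c else pvCcLoop rest (c + 1)

-- inner loop of A for one user j over x[:(cc-1)], state = (tmp[j], streetactions)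
def pvUserLoopA (j : String) : List String → List (List String) → List String → List (List String)
  | [], acc, cur => acc ++ [cur]
  | i :: rest, acc, cur =>
    if PySem.Str.isIn " said " i || PySem.Str.isIn " said," i then
      pvUserLoopA j rest acc cur
    else if PySem.Str.isIn "FLOP" i || PySem.Str.isIn "TURN" i || PySem.Str.isIn "RIVER" i then
      pvUserLoopA j rest (acc ++ [cur]) []
    else if PySem.Str.isIn j i then
      pvUserLoopA j rest acc (cur ++ [i])
    else
      pvUserLoopA j rest acc cur

def zaidejuVeiksmai (x : List String) (maxSeat : Int) (usersList : List String) : (List (String × List (List String))) × Int :=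
  let cc := pvCcLoop x 1
  let rake : Int := 0
  let pref := PySem.List.slice x none (some (cc - 1))
  let tmp := usersList.foldl
    (fun (d : PySem.Dict String (List (List String))) j => d.insert j (pvUserLoopA j pref [] [])) PySem.Dict.empty
  (tmp.items, rake)

-- ===== PORT B =====
-- one log line applied to all user states at once (the two inner 'for st in states' loops)
def pvStepB (line : String) (states : List (String × List (List String) × List String)) :
    List (String × List (List String) × List String) :=
  if PySem.Str.isIn "FLOP" line || PySem.Str.isIn "TURN" line || PySem.Str.isIn "RIVER" line then
    states.map (fun st => (st.1, st.2.1 ++ [st.2.2], ([] : List String)))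
  else
    states.map (fun st => if PySem.Str.isIn st.1 line then (st.1, st.2.1, st.2.2 ++ [line]) else st)

-- B's single pass over the log: break at the first empty line, skip chatter, else step all states
def pvLinesB : List String → List (String × List (List String) × List String) → List (String × List (List String) × List String)
  | [], states => states
  | line :: rest, states =>
    if PySem.Str.len line = 0 then states
    else if PySem.Str.isIn " said " line || PySem.Str.isIn " said," line then pvLinesB rest states
    else pvLinesB rest (pvStepB line states)

def zaidejuVeiksmai_alt (x : List String) (maxSeat : Int) (usersList : List String) : (List (String × List (List String))) × Int :=
  let users := PySem.List.dedup usersList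
  let states := pvLinesB x (users.map (fun j => (j, ([], ([] : List String)))))
  ((PySem.Dict.ofList (states.map (fun st => (st.1, st.2.1 ++ [st.2.2])))).items, 0)

-- ===== PRECONDITION & SPEC =====
def Spec_zaidejuVeiksmai (x : List String) (maxSeat : Int) (usersList : List String) (out : (List (String × List (List String))) × Int) : Prop := out = zaidejuVeiksmai_alt x maxSeat usersList
instance (x : List String) (maxSeat : Int) (usersList : List String) (out : (List (String × List (List String))) × Int) : Decidable (Spec_zaidejuVeiksmai x maxSeat usersList out) := by unfold Spec_zaidejuVeiksmai; infer_instance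

-- ===== CLAIM (what is proved, stated in full; the proofs are below) =====
def Claim_equal_zaidejuVeiksmai : Prop := ∀ (x : List String) (maxSeat : Int) (usersList : List String), Dom_zaidejuVeiksmai x maxSeat usersList → Spec_zaidejuVeiksmai x maxSeat usersList (zaidejuVeiksmai x maxSeat usersList)

-- ===== LEMMAS AND PROOFS =====

-- prefix of x before the first empty line (proof-only characterisation of A's slice)
def pvPrefLoop : List String → List String
  | [] => []
  | i :: rest => if PySem.Str.len i = 0 then [] else i :: pvPrefLoop rest

theorem pvCcLoop_ge (x : List String) (c : Int) : c ≤ pvCcLoop x c := by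
  induction x generalizing c with
  | nil => simp [pvCcLoop]
  | cons i rest ih =>
    simp only [pvCcLoop]
    split
    · exact le_refl c
    · exact le_trans (by omega) (ih (c + 1))

theorem pvCcLoop_succ (x : List String) (c : Int) : pvCcLoop x (c + 1) = pvCcLoop x c + 1 := by
  induction x generalizing c with
  | nil => simp [pvCcLoop]
  | cons i rest ih =>
    simp only [pvCcLoop]
    split
    · rfl
    · exact ih (c + 1)

-- A's slice x[:(cc-1)] is exactly the prefix of lines before the first empty line
theorem pv_slice_eq_prefLoop (x : List String) :
    PySem.List.slice x none (some (pvCcLoop x 1 - 1)) = pvPrefLoop x := by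
  induction x with
  | nil => simp [pvCcLoop, pvPrefLoop, PySem.List.slice]
  | cons i rest ih =>
    by_cases h : PySem.Str.len i = 0
    · have he : i = "" := by
        have := h
        simpa [PySem.Str.len] using this
      simp only [pvCcLoop, if_pos h, pvPrefLoop]
      norm_num [PySem.List.slice_to, he]
    · have h1 : (1 : Int) ≤ pvCcLoop rest 1 := pvCcLoop_ge rest 1
      have hc : pvCcLoop (i :: rest) 1 = pvCcLoop rest 1 + 1 := by
        simp only [pvCcLoop, if_neg h]; exact pvCcLoop_succ rest 1
      rw [hc]
      have hb : (0 : Int) ≤ pvCcLoop rest 1 + 1 - 1 := by omega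
      rw [PySem.List.slice_to _ hb]
      have ht : (pvCcLoop rest 1 + 1 - 1).toNat = (pvCcLoop rest 1 - 1).toNat + 1 := by omega
      rw [ht, List.take_succ_cons]
      rw [PySem.List.slice_to _ (by omega : (0:Int) ≤ pvCcLoop rest 1 - 1)] at ih
      simp only [pvPrefLoop, if_neg h, ih]

-- the per-user state machine B's transposed pass runs for each user
def pvUserRun (j : String) : List String → List (List String) × List String → List (List String) × List String
  | [], st => st
  | line :: rest, st =>
    if PySem.Str.len line = 0 then st
    else if PySem.Str.isIn " said " line || PySem.Str.isIn " said," line then pvUserRun j rest st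
    else if PySem.Str.isIn "FLOP" line || PySem.Str.isIn "TURN" line || PySem.Str.isIn "RIVER" line then
      pvUserRun j rest (st.1 ++ [st.2], [])
    else if PySem.Str.isIn j line then pvUserRun j rest (st.1, st.2 ++ [line])
    else pvUserRun j rest st

-- B's joint pass is the per-user state machine run independently for every state
theorem pvLinesB_eq_map_userRun (lines : List String)
    (states : List (String × List (List String) × List String)) :
    pvLinesB lines states = states.map (fun st => (st.1, pvUserRun st.1 lines st.2)) := by
  induction lines generalizing states with
  | nil => simp [pvLinesB, pvUserRun]
  | cons line rest ih =>
    simp only [pvLinesB, pvUserRun]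
    split
    · simp
    · split
      · exact ih states
      · rw [ih]
        simp only [pvStepB]
        split
        · simp only [List.map_map]
          apply List.map_congr_left
          intro st _
          simp
        · simp only [List.map_map]
          apply List.map_congr_left
          intro st _
          by_cases hj : PySem.Chars.isIn st.1.toList line.toList = true
          · simp [PySem.Str.isIn, hj]
          · simp [PySem.Str.isIn, hj]

-- A's per-user loop over the prefix equals the per-user state machine over the whole log
theorem pvUserLoopA_eq_userRun (j : String) (x : List String)
    (acc : List (List String)) (cur : List String) :
    pvUserLoopA j (pvPrefLoop x) acc cur
      = (pvUserRun j x (acc, cur)).1 ++ [(pvUserRun j x (acc, cur)).2] := by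
  induction x generalizing acc cur with
  | nil => simp [pvPrefLoop, pvUserLoopA, pvUserRun]
  | cons line rest ih =>
    simp only [pvPrefLoop, pvUserRun]
    split
    · simp [pvUserLoopA]
    · simp only [pvUserLoopA]
      split
      · exact ih acc cur
      · split
        · exact ih (acc ++ [cur]) []
        · split
          · exact ih acc (cur ++ [line])
          · exact ih acc cur

-- a fold of inserts whose value depends only on the key: lookup
theorem pv_getD_keyfold {ν : Type} (F : String → ν) (l : List String)
    (d : PySem.Dict String ν) (k : String) (dflt : ν) :
    (l.foldl (fun d j => d.insert j (F j)) d).getD k dflt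
      = if k ∈ l then F k else d.getD k dflt := by
  induction l generalizing d with
  | nil => simp
  | cons a l ih =>
    simp only [List.foldl_cons, ih, PySem.Dict.getD_insert, List.mem_cons]
    by_cases hl : k ∈ l
    · simp [hl]
    · by_cases ha : k = a <;> simp [hl, ha]

-- items of A's insert-fold: first-occurrence keys, each paired with its (key-determined) value
theorem pv_items_keyfold {ν : Type} (F : String → ν) (l : List String) (dflt : ν) :
    (l.foldl (fun (d : PySem.Dict String ν) j => d.insert j (F j)) PySem.Dict.empty).items
      = (PySem.List.dedup l).map (fun j => (j, F j)) := by
  have hk : (l.foldl (fun (d : PySem.Dict String ν) j => d.insert j (F j)) PySem.Dict.empty).keys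
      = PySem.List.dedup l := by
    rw [PySem.Dict.keys_foldl_insert]
    simp only [PySem.Dict.keys_empty]
    rfl
  have hnd : (l.foldl (fun (d : PySem.Dict String ν) j => d.insert j (F j)) PySem.Dict.empty).keys.Nodup :=
    PySem.Dict.nodup_keys_foldl_insert l _ _ PySem.Dict.nodup_keys_empty
  rw [PySem.Dict.items_eq_map_keys _ hnd dflt, hk]
  apply List.map_congr_left
  intro j hj
  have hmem : j ∈ l := (PySem.Set.mem_ofList l j).mp hj
  rw [pv_getD_keyfold F l PySem.Dict.empty j dflt]
  simp [hmem]

-- items of B's dict comprehension over nodup keys: the pair list itself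
theorem pv_items_ofList_nodup {ν : Type} (pairs : List (String × ν))
    (h : (pairs.map Prod.fst).Nodup) :
    (PySem.Dict.ofList pairs).items = pairs := by
  show (pairs.foldl (fun (d : PySem.Dict String ν) p => d.insert p.1 p.2) PySem.Dict.empty).items = pairs
  rw [PySem.Dict.items_foldl_insert_fresh pairs Prod.fst Prod.snd PySem.Dict.empty
    (fun a _ => PySem.Dict.contains_empty a.1) h]
  have he : (PySem.Dict.empty : PySem.Dict String ν).items = [] := rfl
  simp [he]

-- the composed B-side pair list, computed pointwise
theorem pv_B_pairs (x : List String) (users : List String) :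
    (pvLinesB x (users.map (fun j => (j, ([], ([] : List String)))))).map (fun st => (st.1, st.2.1 ++ [st.2.2]))
      = users.map (fun j => (j, (pvUserRun j x ([], [])).1 ++ [(pvUserRun j x ([], [])).2])) := by
  rw [pvLinesB_eq_map_userRun]
  simp only [List.map_map]
  rfl

theorem pv_nodup_B_keys (x : List String) (usersList : List String) :
    (((PySem.List.dedup usersList).map
        (fun j => (j, (pvUserRun j x ([], [])).1 ++ [(pvUserRun j x ([], [])).2]))).map Prod.fst).Nodup := by
  have h2 : (Prod.fst ∘ fun j : String =>
      ((j, (pvUserRun j x ([], [])).1 ++ [(pvUserRun j x ([], [])).2]) : String × List (List String))) = id := rfl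
  rw [List.map_map, h2, List.map_id]
  exact PySem.Set.nodup_ofList usersList

-- ===== VERDICT (by name: the statement is the Claim_ definition above) =====
theorem zaidejuVeiksmai_spec : Claim_equal_zaidejuVeiksmai := by
  intro x maxSeat usersList _
  unfold Spec_zaidejuVeiksmai zaidejuVeiksmai zaidejuVeiksmai_alt
  simp only [pv_slice_eq_prefLoop, pv_B_pairs]
  rw [pv_items_keyfold (fun j => pvUserLoopA j (pvPrefLoop x) [] []) usersList []]
  rw [pv_items_ofList_nodup _ (pv_nodup_B_keys x usersList)]
  refine congrArg (fun l => (l, (0 : Int))) ?_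
  apply List.map_congr_left
  intro j _
  rw [pvUserLoopA_eq_userRun]
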